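-- pv_equiv track=rewrite | github.com/iamnasti/YUR | hdf5/make_bn800.py | get_hex_num_by_spiral
-- ===== SOURCE A (Python) =====
-- def get_hex_num_by_spiral(spiral_num,nring = 2):
--     if(spiral_num > 3*(nring - 1)*nring + 1): raise Exception
--     for ring in range(nring,0,-1):
--         if (spiral_num == 1):
--             return [nring-1,0]
--         else:
--             if (spiral_num > 3*(ring - 2)*(ring - 1) + 1):
--                 c1 = nring - ring
--                 c2 = 3*(ring - 1)*ring + 1 - spiral_num
--                 if (c2 == 6*(ring - 1) - 1):
--                     return [c1,0]
--                 else: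
--                     return [c1,c2+1]
-- ===== SOURCE B (Python) =====
-- def get_hex_num_by_spiral(spiral_num, nring=2):
--     # valid spiral indices are 1 .. 3*(nring-1)*nring + 1 on a board with nring >= 1 rings
--     if nring < 1 or spiral_num < 1 or spiral_num > 3*(nring - 1)*nring + 1:
--         raise Exception
--     if spiral_num == 1:
--         return [nring - 1, 0]
--     t = spiral_num - 1
--     n = 12*t + 8
--     # integer floor square root of n by Newton's method (no math module used in A's file)
--     x = n
--     y = (x + 1) // 2
--     while y < x:
--         x = y
--         y = (x + n // x) // 2
--     k = (x + 3) // 6          # ring index: unique k with 3k(k-1) < t <= 3k(k+1)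
--     c2 = 3*k*(k + 1) - t
--     if c2 == 6*k - 1:
--         return [nring - k - 1, 0]
--     return [nring - k - 1, c2 + 1]
-- ===== Notes on version B (the rewrite author's own statement) =====
-- stated objective: faster
-- what changed: Instead of scanning rings downward from nring until the ring containing spiral_num is found, B computes the ring index directly by inverting the quadratic ring-threshold formula with an integer Newton square root, then emits the coordinates by the same closed formulas.
-- outside the precondition, e.g. on get_hex_num_by_spiral(0, 2): A returns None, B raises Exception; on get_hex_num_by_spiral(1, 0): A returns None, B raises Exception
import Mathlib
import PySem

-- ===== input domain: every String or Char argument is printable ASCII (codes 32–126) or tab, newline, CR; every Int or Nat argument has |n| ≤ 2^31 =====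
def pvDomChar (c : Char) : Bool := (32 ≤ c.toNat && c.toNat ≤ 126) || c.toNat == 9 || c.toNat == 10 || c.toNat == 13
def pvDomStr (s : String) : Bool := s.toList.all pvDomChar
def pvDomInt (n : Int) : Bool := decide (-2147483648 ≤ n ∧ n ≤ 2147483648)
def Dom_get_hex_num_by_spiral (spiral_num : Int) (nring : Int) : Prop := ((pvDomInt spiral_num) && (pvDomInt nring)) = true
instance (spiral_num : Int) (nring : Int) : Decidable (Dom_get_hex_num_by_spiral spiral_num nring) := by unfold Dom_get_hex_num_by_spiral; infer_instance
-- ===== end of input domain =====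

-- B replaces A's downward scan over rings by a direct arithmetic inversion of the
-- ring-threshold quadratic via an integer Newton square root; equivalence proved on Pre_.

-- ===== PORT A =====
-- the for-loop over range(nring, 0, -1) with early returns; [] encodes the fall-through
-- (Python returns None there; such inputs are outside Pre_)
def pvALoop (spiral_num : Int) (nring : Int) (rings : List Int) : List Int :=
  match rings with
  | [] => []
  | ring :: rest =>
    if spiral_num = 1 then [nring - 1, 0]
    else if 3*(ring - 2)*(ring - 1) + 1 < spiral_num then
      let c1 := nring - ring
      let c2 := 3*(ring - 1)*ring + 1 - spiral_num
      if c2 = 6*(ring - 1) - 1 then [c1, 0] else [c1, c2 + 1]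
    else pvALoop spiral_num nring rest

def get_hex_num_by_spiral (spiral_num : Int) (nring : Int) : List Int :=
  if 3*(nring - 1)*nring + 1 < spiral_num then []   -- Python raises here; outside Pre_
  else pvALoop spiral_num nring (PySem.List.pyRange nring 0 (-1))

-- ===== PORT B =====
-- Source B's Newton while-loop 'while y < x: x = y; y = (x + n//x)//2'
def pvNewton (n : Nat) (x : Nat) (y : Nat) : Nat :=
  if h : y < x then pvNewton n y ((y + n / y) / 2) else x
termination_by x
decreasing_by exact h

-- Source B's Newton loop started at x = n, y = (n+1)//2.  For n < 0 the Python loop body never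
-- executes ((n+1)//2 < n is false for n ≤ 1), so x stays n; for n ≥ 0 every intermediate
-- value is a nonnegative integer and Python's // agrees with Nat division, so the Nat
-- recursion is an exact transcription.
def pvIsqrt (n : Int) : Int :=
  if n < 0 then n else ((pvNewton n.toNat n.toNat ((n.toNat + 1) / 2) : Nat) : Int)

def get_hex_num_by_spiral_alt (spiral_num : Int) (nring : Int) : List Int :=
  -- Source B raises on this compound domain check; outside Pre_
  if nring < 1 ∨ spiral_num < 1 ∨ 3*(nring - 1)*nring + 1 < spiral_num then []
  else if spiral_num = 1 then [nring - 1, 0]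
  else
    let t := spiral_num - 1
    let n := 12*t + 8
    let x := pvIsqrt n
    let k := PySem.Int.floordiv (x + 3) 6
    let c2 := 3*k*(k + 1) - t
    if c2 = 6*k - 1 then [nring - k - 1, 0] else [nring - k - 1, c2 + 1]

-- ===== PRECONDITION & SPEC =====
-- Pre_ excludes exactly the inputs where Python A does not return a list: it raises when
-- spiral_num > 3*(nring-1)*nring + 1, and it falls through returning None when
-- spiral_num < 1, or when spiral_num = 1 with nring < 1 (empty loop).
def Pre_get_hex_num_by_spiral (spiral_num : Int) (nring : Int) : Prop :=
  1 ≤ spiral_num ∧ spiral_num ≤ 3*(nring - 1)*nring + 1 ∧ 1 ≤ nring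

instance (spiral_num : Int) (nring : Int) : Decidable (Pre_get_hex_num_by_spiral spiral_num nring) := by
  unfold Pre_get_hex_num_by_spiral; infer_instance

def pvWitness_get_hex_num_by_spiral : Int × Int := (5, 2)

def Spec_get_hex_num_by_spiral (spiral_num : Int) (nring : Int) (out : List Int) : Prop := out = get_hex_num_by_spiral_alt spiral_num nring
instance (spiral_num : Int) (nring : Int) (out : List Int) : Decidable (Spec_get_hex_num_by_spiral spiral_num nring out) := by unfold Spec_get_hex_num_by_spiral; infer_instance

-- ===== CLAIM (what is proved, stated in full; the proofs are below) =====
def Claim_equal_get_hex_num_by_spiral : Prop := ∀ (spiral_num : Int) (nring : Int), Dom_get_hex_num_by_spiral spiral_num nring → Pre_get_hex_num_by_spiral spiral_num nring → Spec_get_hex_num_by_spiral spiral_num nring (get_hex_num_by_spiral spiral_num nring)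

-- ===== LEMMAS AND PROOFS =====

-- a Newton step from any x ≥ 1 never drops below ⌊√n⌋
theorem pv_newton_ge_sqrt (n x : Nat) (hx : 1 ≤ x) : Nat.sqrt n ≤ (x + n / x) / 2 := by
  set s := Nat.sqrt n with hsdef
  have hs : s * s ≤ n := by simpa [pow_two] using Nat.sqrt_le' n
  rw [Nat.le_div_iff_mul_le (by norm_num)]
  by_cases hxs : 2 * s ≤ x
  · have := Nat.zero_le (n / x); omega
  · have hxlt : x ≤ 2 * s := by omega
    have h1 : (2 * s - x) * x ≤ n := by
      have : (2 * s - x) * x ≤ s * s := by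
        zify [hxlt]
        nlinarith [sq_nonneg ((s : Int) - x)]
      omega
    have h2 : 2 * s - x ≤ n / x := (Nat.le_div_iff_mul_le hx).mpr h1
    omega

-- at a Newton fixpoint, x ≤ ⌊√n⌋
theorem pv_newton_exit (n x : Nat) (hx : 1 ≤ x) (h : ¬ (x + n / x) / 2 < x) : x ≤ Nat.sqrt n := by
  have h1 : x ≤ (x + n / x) / 2 := by omega
  have h2 : x * 2 ≤ x + n / x := (Nat.le_div_iff_mul_le (by norm_num)).mp h1
  have h3 : x ≤ n / x := by omega
  have h4 : x * x ≤ n := (Nat.le_div_iff_mul_le hx).mp h3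
  exact Nat.le_sqrt'.mpr (by simpa [pow_two] using h4)

theorem pvNewton_eq_sqrt (n : Nat) (hn : 1 ≤ n) :
    ∀ x, 1 ≤ x → Nat.sqrt n ≤ x → pvNewton n x ((x + n / x) / 2) = Nat.sqrt n := by
  intro x
  induction x using Nat.strong_induction_on with
  | _ x ih =>
    intro hx1 hxs
    rw [pvNewton]
    split
    · rename_i h
      have hy1 : 1 ≤ (x + n / x) / 2 := by
        have := pv_newton_ge_sqrt n x hx1
        have hs1 : 1 ≤ Nat.sqrt n := Nat.sqrt_pos.mpr hn
        omega
      exact ih _ h hy1 (pv_newton_ge_sqrt n x hx1)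
    · rename_i h
      have := pv_newton_exit n x hx1 h
      omega

theorem pvIsqrt_eq (n : Int) (hn : 1 ≤ n) : pvIsqrt n = (Nat.sqrt n.toNat : Int) := by
  unfold pvIsqrt
  rw [if_neg (by omega)]
  have h1 : 1 ≤ n.toNat := by omega
  have hdiv : n.toNat / n.toNat = 1 := Nat.div_self h1
  have : (n.toNat + 1) / 2 = (n.toNat + n.toNat / n.toNat) / 2 := by rw [hdiv]
  rw [this, pvNewton_eq_sqrt n.toNat h1 n.toNat h1 (Nat.sqrt_le_self _)]

-- B's ring index k = (⌊√(12t+8)⌋+3)//6 is the unique k with 3k(k-1) < t ≤ 3k(k+1)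
theorem pv_k_bounds (t : Int) (ht : 1 ≤ t)
    (q : Int) (hq0 : 0 ≤ q) (hq2 : q*q ≤ 12*t+8) (hq3 : 12*t+8 < (q+1)*(q+1))
    (k : Int) (hk : k = PySem.Int.floordiv (q + 3) 6) :
    1 ≤ k ∧ 3*k*(k-1) < t ∧ t ≤ 3*k*(k+1) := by
  obtain ⟨hk1, hk2⟩ :=
    (PySem.Int.floordiv_eq_iff_of_pos (a := q + 3) (b := 6) (q := k) (by norm_num)).mp hk.symm
  have hq4 : 4 ≤ q := by nlinarith
  have hkpos : 1 ≤ k := by omega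
  have hlo : (6*k-3)*(6*k-3) ≤ q*q := by
    have h1 : 0 ≤ 6*k-3 := by omega
    have h2 : 6*k-3 ≤ q := by omega
    nlinarith
  have hhi : (q+1)*(q+1) ≤ (6*k+3)*(6*k+3) := by
    have h1 : 0 ≤ q+1 := by omega
    have h2 : q+1 ≤ 6*k+3 := by omega
    nlinarith
  refine ⟨hkpos, by nlinarith, by nlinarith⟩

-- A's loop, scanned downward from any m ≥ r, returns the ring-r coordinates
theorem pvALoop_finds (s nring r : Int) (hr : 1 ≤ r) (hs : 2 ≤ s)
    (hlow : 3*(r - 2)*(r - 1) + 1 < s) (hhigh : s ≤ 3*(r - 1)*r + 1) :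
    ∀ m, r ≤ m → pvALoop s nring (PySem.List.pyRange m 0 (-1)) =
      (if 3*(r - 1)*r + 1 - s = 6*(r - 1) - 1 then [nring - r, 0]
       else [nring - r, 3*(r - 1)*r + 1 - s + 1]) := by
  intro m hm
  induction m, hm using Int.le_induction with
  | base =>
    rw [PySem.List.pyRange_neg_one_cons (by omega)]
    rw [pvALoop]
    rw [if_neg (by omega), if_pos hlow]
  | succ m hm ih =>
    rw [PySem.List.pyRange_neg_one_cons (by omega)]
    rw [pvALoop]
    rw [if_neg (by omega)]
    have hmono : 3*(r - 1)*r ≤ 3*(m + 1 - 2)*(m + 1 - 1) := by nlinarith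
    rw [if_neg (by omega)]
    have : m + 1 - 1 = m := by ring
    rw [this]
    exact ih

-- ===== VERDICT (by name: the statement is the Claim_ definition above) =====
theorem get_hex_num_by_spiral_spec : Claim_equal_get_hex_num_by_spiral := by
  intro s nring _ hpre
  obtain ⟨hs1, hs2, hn1⟩ := hpre
  have hprod : 0 ≤ (nring - 1) * nring := by nlinarith
  have hguard : ¬ 3*(nring - 1)*nring + 1 < s := by nlinarith
  unfold Spec_get_hex_num_by_spiral get_hex_num_by_spiral get_hex_num_by_spiral_alt
  rw [if_neg hguard, if_neg (by push Not; exact ⟨hn1, hs1, by omega⟩)]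
  by_cases hone : s = 1
  · rw [if_pos hone]
    rw [PySem.List.pyRange_neg_one_cons (by omega)]
    rw [pvALoop, if_pos hone]
  · rw [if_neg hone]
    simp only []
    have ht : 1 ≤ s - 1 := by omega
    have hn' : (1:Int) ≤ 12*(s - 1) + 8 := by omega
    rw [pvIsqrt_eq _ hn']
    set q : Int := (Nat.sqrt (12*(s - 1) + 8).toNat : Int) with hqdef
    set k : Int := PySem.Int.floordiv (q + 3) 6 with hkdef
    have hq0 : 0 ≤ q := by positivity
    have hcast : ((12*(s - 1) + 8).toNat : Int) = 12*(s - 1) + 8 := Int.toNat_of_nonneg (by omega)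
    have hq2 : q*q ≤ 12*(s - 1)+8 := by
      have := Nat.sqrt_le' (12*(s - 1) + 8).toNat
      rw [pow_two] at this
      calc q*q = (((Nat.sqrt (12*(s - 1) + 8).toNat * Nat.sqrt (12*(s - 1) + 8).toNat : Nat)) : Int) := by
            push_cast [hqdef]; ring
        _ ≤ (((12*(s - 1) + 8).toNat : Nat) : Int) := by exact_mod_cast this
        _ = 12*(s - 1)+8 := hcast
    have hq3 : 12*(s - 1)+8 < (q+1)*(q+1) := by
      have := Nat.lt_succ_sqrt' (12*(s - 1) + 8).toNat
      rw [Nat.succ_eq_add_one, pow_two] at this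
      calc 12*(s - 1)+8 = (((12*(s - 1) + 8).toNat : Nat) : Int) := hcast.symm
        _ < (((Nat.sqrt (12*(s - 1) + 8).toNat + 1) * (Nat.sqrt (12*(s - 1) + 8).toNat + 1) : Nat) : Int) := by
            exact_mod_cast this
        _ = (q+1)*(q+1) := by push_cast [hqdef]; ring
    obtain ⟨hk1, hklo, hkhi⟩ := pv_k_bounds (s - 1) ht q hq0 hq2 hq3 k hkdef
    have hrle : k + 1 ≤ nring := by
      by_contra hcon
      rw [not_le] at hcon
      have hle : nring ≤ k := by omega
      have : 3*(nring - 1)*nring ≤ 3*(k - 1)*k := by nlinarith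
      nlinarith
    rw [pvALoop_finds s nring (k+1) (by omega) (by omega)
          (by nlinarith) (by nlinarith) nring hrle]
    have e1 : 3*((k+1) - 1)*(k+1) + 1 - s = 3*k*(k+1) - (s - 1) := by ring
    have e2 : 6*((k+1) - 1) - 1 = 6*k - 1 := by ring
    have e3 : nring - (k+1) = nring - k - 1 := by ring
    rw [e1, e2, e3]
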